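-- pv_equiv track=rewrite | github.com/Bukio-chan/sotsuken_flask | cgi-bin/sotsuken.py | start_time
-- ===== SOURCE A (Python) =====
-- def start_time(hour,minute): #スタート時間取得
--   time_ = 0
--   num = 1
--   for i in range(8,21):
--     if hour <= i:
--       time_ = num
--       if minute >= 30:
--         time_ += 1
--     num += 2
--   return time_
-- ===== SOURCE B (Python) =====
-- def start_time(hour, minute):
--     # The loop in A overwrites time_ on every i with hour <= i; its last
--     # matching iteration is i = 20 with num = 25, so the result is a closed form.
--     if hour > 20:
--         return 0
--     return 26 if minute >= 30 else 25
-- ===== Notes on version B (the rewrite author's own statement) =====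
-- stated objective: simpler
-- what changed: Replaced the 13-iteration loop (whose only surviving write is its last matching iteration) by a direct closed form: 0 if hour > 20, else 25 plus 1 when minute >= 30.
import Mathlib
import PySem

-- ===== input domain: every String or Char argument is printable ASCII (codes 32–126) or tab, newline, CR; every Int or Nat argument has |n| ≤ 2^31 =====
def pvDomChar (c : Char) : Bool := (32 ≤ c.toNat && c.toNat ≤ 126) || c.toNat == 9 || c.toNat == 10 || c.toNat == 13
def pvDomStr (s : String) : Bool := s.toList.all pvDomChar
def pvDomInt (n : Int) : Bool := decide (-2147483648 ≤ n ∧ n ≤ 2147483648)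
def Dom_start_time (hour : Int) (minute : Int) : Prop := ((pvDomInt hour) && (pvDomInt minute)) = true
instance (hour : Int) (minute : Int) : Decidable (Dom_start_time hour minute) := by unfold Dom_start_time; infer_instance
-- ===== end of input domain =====

-- ===== PORT A =====
-- literal transliteration of A: fold over range(8,21) carrying (time_, num)
def start_time (hour : Int) (minute : Int) : Int :=
  let s := (PySem.List.pyRange 8 21 1).foldl
    (fun (s : Int × Int) i =>
      let time_ := if hour ≤ i then
          (if minute ≥ 30 then s.2 + 1 else s.2)
        else s.1
      (time_, s.2 + 2)) (0, 1)
  s.1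

-- ===== PORT B =====
-- closed form: B changes the algorithm to a direct case split, no loop (objective: simpler)
def start_time_alt (hour : Int) (minute : Int) : Int :=
  if hour > 20 then 0
  else if minute ≥ 30 then 26 else 25

-- ===== PRECONDITION & SPEC =====
def Spec_start_time (hour : Int) (minute : Int) (out : Int) : Prop := out = start_time_alt hour minute
instance (hour : Int) (minute : Int) (out : Int) : Decidable (Spec_start_time hour minute out) := by unfold Spec_start_time; infer_instance

-- ===== CLAIM (what is proved, stated in full; the proofs are below) =====
def Claim_equal_start_time : Prop := ∀ (hour : Int) (minute : Int), Dom_start_time hour minute → Spec_start_time hour minute (start_time hour minute)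

-- ===== LEMMAS AND PROOFS =====
theorem pyRange_8_21 : PySem.List.pyRange 8 21 1 = [8,9,10,11,12,13,14,15,16,17,18,19,20] := by rw [PySem.List.pyRange_one]; rfl

-- ===== VERDICT (by name: the statement is the Claim_ definition above) =====
set_option maxHeartbeats 2000000 in
theorem start_time_spec : Claim_equal_start_time := by
  intro hour minute _
  unfold Spec_start_time start_time start_time_alt
  rw [pyRange_8_21]
  simp only [List.foldl]
  by_cases h : hour ≤ 20
  · simp only [if_pos h]
    split_ifs <;> omega
  · have c : ∀ i : Int, i ≤ 20 → ¬ (hour ≤ i) := by omega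
    simp only [if_neg (c 8 (by norm_num)), if_neg (c 9 (by norm_num)),
      if_neg (c 10 (by norm_num)), if_neg (c 11 (by norm_num)),
      if_neg (c 12 (by norm_num)), if_neg (c 13 (by norm_num)),
      if_neg (c 14 (by norm_num)), if_neg (c 15 (by norm_num)),
      if_neg (c 16 (by norm_num)), if_neg (c 17 (by norm_num)),
      if_neg (c 18 (by norm_num)), if_neg (c 19 (by norm_num)),
      if_neg (c 20 (by norm_num))]
    split_ifs <;> omega
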